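-- pv_equiv track=rewrite | github.com/Ashiq-am/Data-Structures-Algorithm | 1.Python Algorithms/11.Dynamic Programming/5.Hard Problems/39.Check if all people can vote on two machines/Method 2.py | canVote
-- ===== SOURCE A (Python) =====
-- def canVote(a, n, x):
--     # calculate total sum i.e total
--     # time taken by all people
--     total_sum = 0
--     for i in range(len(a)):
--         total_sum += a[i]
--
--     # if total time is less than x then
--     # all people can definitely vote
--     # hence return true
--     if (total_sum <= x):
--         return True
--
--     # sort the list
--     a.sort()
--
--     # declare a list presum of same size
--     # as that of a and initialize it with 0
--     presum = [0 for i in range(len(a))]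
--
--     # prefixsum for first element
--     # will be element itself
--     presum[0] = a[0]
--
--     # fill the array
--     for i in range(1, len(presum)):
--         presum[i] = presum[i - 1] + a[i]
--
--     # Set i and j and check if array
--     # from i to j - 1 gives sum <= x
--     for i in range(0, len(presum)):
--         for j in range(i + 1, len(presum)):
--             arr1_sum = (presum[i] + (total_sum - presum[j]))
--             if ((arr1_sum <= x) and
--                     (total_sum - arr1_sum) <= x):
--                 return True
--
--     return False
-- ===== SOURCE B (Python) =====
-- # One pass over sorted prefix sums, keeping earlier prefix sums in a sorted list
-- # and binary-searching the target window, instead of A's nested O(n^2) pair scan.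
-- # Note: A sorts `a` in place; B does not mutate `a` (return value is the same).
--
-- def _lower_bound(s, v):
--     lo, hi = 0, len(s)
--     while lo < hi:
--         m = (lo + hi) // 2
--         if s[m] < v:
--             lo = m + 1
--         else:
--             hi = m
--     return lo
--
--
-- def canVote(a, n, x):
--     total = sum(a)
--     if total <= x:
--         return True
--     low = total - x
--     seen = []
--     p = 0
--     for t in sorted(a):
--         p += t
--         k = _lower_bound(seen, p - x)
--         if k < len(seen) and seen[k] <= p - low:
--             return True
--         seen.insert(_lower_bound(seen, p), p)
--     return False
-- ===== Notes on version B (the rewrite author's own statement) =====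
-- stated objective: faster
-- what changed: A scans all O(n^2) prefix/suffix index pairs over the prefix-sum array; B makes one pass over the sorted prefix sums, keeping the earlier prefix sums in a sorted list and binary-searching it for the target window; B also does not mutate the input list (A sorts it in place).
import Mathlib
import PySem

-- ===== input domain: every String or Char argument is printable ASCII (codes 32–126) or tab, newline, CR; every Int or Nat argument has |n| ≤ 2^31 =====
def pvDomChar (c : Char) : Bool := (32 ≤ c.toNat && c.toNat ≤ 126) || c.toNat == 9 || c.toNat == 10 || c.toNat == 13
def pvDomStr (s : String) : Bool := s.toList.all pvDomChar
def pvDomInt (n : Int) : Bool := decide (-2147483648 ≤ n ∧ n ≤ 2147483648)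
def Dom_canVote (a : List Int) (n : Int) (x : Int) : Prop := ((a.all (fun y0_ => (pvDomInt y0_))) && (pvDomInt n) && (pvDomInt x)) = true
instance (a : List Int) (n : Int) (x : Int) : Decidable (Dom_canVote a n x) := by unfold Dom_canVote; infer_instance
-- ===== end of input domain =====

-- B replaces A's nested scan over all prefix/suffix index pairs by one pass over the
-- sorted prefix sums that keeps the earlier prefix sums in a sorted list and
-- binary-searches the target window.  (A sorts `a` in place, B does not mutate `a`;
-- the theorems are about the return value.)

-- ===== PORT A =====
-- helper: the loop 'for i in range(1, len(presum)): presum[i] = presum[i-1] + a[i]'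
-- (fills the prefix-sum array left to right, carrying the previous entry)
def presumTail (prev : Int) : List Int → List Int
  | [] => []
  | y :: ys => (prev + y) :: presumTail (prev + y) ys

def canVote (a : List Int) (n : Int) (x : Int) : Bool :=
  let _ := n
  let total := (PySem.List.pyRange 0 (PySem.List.len a) 1).foldl
    (fun acc i => acc + PySem.List.pyGetD a i 0) 0
  if total ≤ x then true
  else
    let s := PySem.List.sorted a (fun v => v) false
    let presum : List Int :=
      match s with
      | [] => []               -- Python raises IndexError at 'presum[0] = a[0]' here; excluded by Pre_
      | h :: t => h :: presumTail h t
    (PySem.List.pyRange 0 (PySem.List.len presum) 1).any fun i =>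
      (PySem.List.pyRange (i + 1) (PySem.List.len presum) 1).any fun j =>
        let arr1 := PySem.List.pyGetD presum i 0 + (total - PySem.List.pyGetD presum j 0)
        decide (arr1 ≤ x) && decide (total - arr1 ≤ x)

-- ===== PORT B =====
-- _lower_bound(s, v): hand-written binary search (s[m] is always in range, so List.getD is exact)
def lbLoop (s : List Int) (v : Int) (lo hi : Nat) : Nat :=
  if lo < hi then
    let m := (lo + hi) / 2
    if s.getD m 0 < v then lbLoop s v (m + 1) hi else lbLoop s v lo m
  else lo
termination_by hi - lo
decreasing_by all_goals omega

def lowerBound (s : List Int) (v : Int) : Nat := lbLoop s v 0 s.length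

-- the 'for t in sorted(a):' loop of B, carrying the running prefix sum p and the sorted list seen
def bLoop (x low : Int) (p : Int) (seen : List Int) : List Int → Bool
  | [] => false
  | t :: ts =>
    let p' := p + t
    let k := lowerBound seen (p' - x)
    if decide (k < seen.length) && decide (seen.getD k 0 ≤ p' - low) then true
    else bLoop x low p' (PySem.List.insert seen ((lowerBound seen p' : Nat) : Int) p') ts

def canVote_alt (a : List Int) (n : Int) (x : Int) : Bool :=
  let _ := n
  let total := a.foldl (fun acc t => acc + t) 0
  if total ≤ x then true
  else bLoop x (total - x) 0 [] (PySem.List.sorted a (fun v => v) false)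

-- ===== PRECONDITION & SPEC =====
-- Pre_ excludes exactly the inputs where A raises: on an empty list with x < 0 the
-- Python A reaches 'presum[0] = a[0]' and raises IndexError.
def Pre_canVote (a : List Int) (n : Int) (x : Int) : Prop := a ≠ [] ∨ 0 ≤ x
instance (a : List Int) (n : Int) (x : Int) : Decidable (Pre_canVote a n x) := by
  unfold Pre_canVote; infer_instance

def pvWitness_canVote : List Int × Int × Int := ([3, 1, 2], 3, 4)

def Spec_canVote (a : List Int) (n : Int) (x : Int) (out : Bool) : Prop := out = canVote_alt a n x
instance (a : List Int) (n : Int) (x : Int) (out : Bool) : Decidable (Spec_canVote a n x out) := by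
  unfold Spec_canVote; infer_instance

-- ===== CLAIM (what is proved, stated in full; the proofs are below) =====
def Claim_equal_canVote : Prop := ∀ (a : List Int) (n : Int) (x : Int), Dom_canVote a n x → Pre_canVote a n x → Spec_canVote a n x (canVote a n x)
-- ===== LEMMAS AND PROOFS =====

-- reference prefix-sum list: presums p [t1, t2, …] = [p+t1, p+t1+t2, …]
def presums (p : Int) : List Int → List Int
  | [] => []
  | t :: ts => (p + t) :: presums (p + t) ts

-- reference scan: for each q of Q in turn, test q against every earlier element, then add q
def pairScan (x low : Int) (seen : List Int) : List Int → Bool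
  | [] => false
  | q :: qs =>
    (seen.any fun e => decide (q - x ≤ e) && decide (e ≤ q - low)) || pairScan x low (q :: seen) qs

theorem presumTail_eq (l : List Int) (p : Int) : presumTail p l = presums p l := by
  induction l generalizing p with
  | nil => rfl
  | cons y ys ih => simp [presumTail, presums, ih]

theorem pairScan_perm (x low : Int) (s₁ s₂ Q : List Int) (h : s₁.Perm s₂) :
    pairScan x low s₁ Q = pairScan x low s₂ Q := by
  induction Q generalizing s₁ s₂ with
  | nil => rfl
  | cons q qs ih =>
    simp only [pairScan, h.any_eq, ih (q :: s₁) (q :: s₂) (h.cons q)]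

theorem pairScan_iff (x low : Int) (seen Q : List Int) :
    pairScan x low seen Q = true ↔
      (∃ e ∈ seen, ∃ q ∈ Q, q - x ≤ e ∧ e ≤ q - low) ∨
      (∃ e q, [e, q].Sublist Q ∧ q - x ≤ e ∧ e ≤ q - low) := by
  induction Q generalizing seen with
  | nil => simp [pairScan]
  | cons q qs ih =>
    simp only [pairScan, Bool.or_eq_true, List.any_eq_true, Bool.and_eq_true,
      decide_eq_true_eq, ih, List.mem_cons]
    constructor
    · rintro (⟨e, he, h1, h2⟩ | ⟨e, (rfl | he), q', hq', h1, h2⟩ | ⟨e, q', hsub, h1, h2⟩)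
      · exact Or.inl ⟨e, he, q, Or.inl rfl, h1, h2⟩
      · exact Or.inr ⟨e, q', (List.cons_sublist_cons.mpr (List.singleton_sublist.mpr hq')), h1, h2⟩
      · exact Or.inl ⟨e, he, q', Or.inr hq', h1, h2⟩
      · exact Or.inr ⟨e, q', hsub.cons q, h1, h2⟩
    · rintro (⟨e, he, q', (rfl | hq'), h1, h2⟩ | ⟨e, q', hsub, h1, h2⟩)
      · exact Or.inl ⟨e, he, h1, h2⟩
      · exact Or.inr (Or.inl ⟨e, Or.inr he, q', hq', h1, h2⟩)
      · rcases List.sublist_cons_iff.mp hsub with h | ⟨r, hr, hrs⟩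
        · exact Or.inr (Or.inr ⟨e, q', h, h1, h2⟩)
        · injection hr with hq hr'
          subst hq; subst hr'
          exact Or.inr (Or.inl ⟨e, Or.inl rfl, q', List.singleton_sublist.mp hrs, h1, h2⟩)

theorem pair_sublist_iff (P : List Int) (W : Int → Int → Prop) :
    (∃ i j : Nat, i < j ∧ j < P.length ∧ W (P.getD i 0) (P.getD j 0)) ↔
      ∃ e q, [e, q].Sublist P ∧ W e q := by
  constructor
  · rintro ⟨i, j, hij, hj, hw⟩
    have hi : i < P.length := lt_trans hij hj
    refine ⟨P[i], P[j], ?_, ?_⟩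
    · have := List.map_getElem_sublist (l := P) (is := [⟨i, hi⟩, ⟨j, hj⟩])
        (by simp [hij])
      simpa using this
    · rwa [List.getD_eq_getElem P 0 hi, List.getD_eq_getElem P 0 hj] at hw
  · rintro ⟨e, q, hsub, hw⟩
    obtain ⟨is, heq, hpw⟩ := List.sublist_eq_map_getElem hsub
    match is, heq with
    | [i, j], heq =>
      simp only [List.map_cons, List.map_nil, List.cons.injEq, and_true] at heq
      obtain ⟨he, hq⟩ := heq
      have hij : (i : Nat) < (j : Nat) := by
        have := List.pairwise_cons.mp hpw
        exact this.1 j (by simp)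
      refine ⟨i, j, hij, j.isLt, ?_⟩
      rw [List.getD_eq_getElem P 0 i.isLt, List.getD_eq_getElem P 0 j.isLt]
      subst he; subst hq; exact hw

-- A's nested index loops, as an existence statement
theorem anyPairs_iff (P : List Int) (W : Int → Int → Bool) :
    ((PySem.List.pyRange 0 (PySem.List.len P) 1).any fun i =>
      (PySem.List.pyRange (i + 1) (PySem.List.len P) 1).any fun j =>
        W (PySem.List.pyGetD P i 0) (PySem.List.pyGetD P j 0)) = true ↔
      ∃ i j : Nat, i < j ∧ j < P.length ∧ W (P.getD i 0) (P.getD j 0) = true := by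
  simp only [List.any_eq_true, PySem.List.mem_pyRange_one, PySem.List.len_eq]
  constructor
  · rintro ⟨i, ⟨hi0, hilen⟩, j, ⟨hji, hjlen⟩, hw⟩
    have hi : i < (P.length : Int) := by omega
    have hj0 : (0:Int) ≤ j := by omega
    have hjlen' : j < (P.length : Int) := hjlen
    rw [PySem.List.pyGetD_eq_getElem P 0 hi0 hi,
        PySem.List.pyGetD_eq_getElem P 0 hj0 hjlen'] at hw
    refine ⟨i.toNat, j.toNat, by omega, by omega, ?_⟩
    rw [List.getD_eq_getElem P 0 (by omega), List.getD_eq_getElem P 0 (by omega)]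
    exact hw
  · rintro ⟨i, j, hij, hjlen, hw⟩
    refine ⟨(i : Int), ⟨by omega, by omega⟩, (j : Int), ⟨by omega, by omega⟩, ?_⟩
    rw [List.getD_eq_getElem P 0 (by omega), List.getD_eq_getElem P 0 hjlen] at hw
    rw [PySem.List.pyGetD_eq_getElem P (i := (i:Int)) 0 (by omega) (by omega),
        PySem.List.pyGetD_eq_getElem P (i := (j:Int)) 0 (by omega) (by omega)]
    simpa using hw

-- lowerBound: correctness of the hand-written binary search on a sorted list
theorem sorted_getD_mono (s : List Int) (hs : s.Pairwise (· ≤ ·)) (i j : Nat)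
    (hij : i ≤ j) (hj : j < s.length) : s.getD i 0 ≤ s.getD j 0 := by
  rcases Nat.eq_or_lt_of_le hij with rfl | h
  · exact le_refl _
  · rw [List.getD_eq_getElem s 0 (by omega), List.getD_eq_getElem s 0 hj]
    exact List.pairwise_iff_getElem.mp hs i j (by omega) hj h

theorem lbLoop_spec (s : List Int) (v : Int) (lo hi : Nat)
    (hs : s.Pairwise (· ≤ ·)) (hhi : hi ≤ s.length) (hlohi : lo ≤ hi)
    (hbelow : ∀ i, i < lo → s.getD i 0 < v)
    (habove : ∀ i, hi ≤ i → i < s.length → v ≤ s.getD i 0) :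
    lbLoop s v lo hi ≤ s.length ∧
      (∀ i, i < lbLoop s v lo hi → s.getD i 0 < v) ∧
      (∀ i, lbLoop s v lo hi ≤ i → i < s.length → v ≤ s.getD i 0) := by
  revert hhi hlohi hbelow habove
  induction lo, hi using lbLoop.induct s v with
  | case1 lo hi hlt m hm ih =>
    have hmeq : m = (lo + hi) / 2 := rfl
    rw [hmeq] at hm ih
    intro hhi hlohi hbelow habove
    rw [lbLoop]
    simp only [if_pos hlt, if_pos hm]
    exact ih hhi (by omega)
      (fun i hi' => lt_of_le_of_lt
        (sorted_getD_mono s hs i ((lo + hi) / 2) (by omega) (by omega)) hm)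
      habove
  | case2 lo hi hlt m hm ih =>
    have hmeq : m = (lo + hi) / 2 := rfl
    rw [hmeq] at hm ih
    intro hhi hlohi hbelow habove
    rw [lbLoop]
    simp only [if_pos hlt, if_neg hm]
    exact ih (by omega) (by omega) hbelow
      (fun i hi' hlen => le_trans (not_lt.mp hm)
        (sorted_getD_mono s hs ((lo + hi) / 2) i hi' hlen))
  | case3 lo hi hge =>
    intro hhi hlohi hbelow habove
    rw [lbLoop, if_neg hge]
    exact ⟨by omega, fun i hi' => hbelow i hi', fun i hi' hlen => habove i (by omega) hlen⟩

theorem lowerBound_spec (s : List Int) (v : Int) (hs : s.Pairwise (· ≤ ·)) :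
    lowerBound s v ≤ s.length ∧
      (∀ i, i < lowerBound s v → s.getD i 0 < v) ∧
      (∀ i, lowerBound s v ≤ i → i < s.length → v ≤ s.getD i 0) := by
  exact lbLoop_spec s v 0 s.length hs le_rfl (Nat.zero_le _)
    (fun i hi => absurd hi (Nat.not_lt_zero i))
    (fun i hi hlen => absurd (Nat.lt_of_le_of_lt hi hlen) (lt_irrefl _))

-- the searched window contains an element iff some element of the sorted list lies in [lo, hi]
theorem search_iff (s : List Int) (lo hi : Int) (hs : s.Pairwise (· ≤ ·)) :
    (lowerBound s lo < s.length ∧ s.getD (lowerBound s lo) 0 ≤ hi) ↔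
      ∃ e ∈ s, lo ≤ e ∧ e ≤ hi := by
  obtain ⟨hle, hbelow, habove⟩ := lowerBound_spec s lo hs
  constructor
  · rintro ⟨hk, hkhi⟩
    refine ⟨s.getD (lowerBound s lo) 0, ?_, habove _ le_rfl hk, hkhi⟩
    rw [List.getD_eq_getElem s 0 hk]
    exact List.getElem_mem hk
  · rintro ⟨e, he, helo, hehi⟩
    obtain ⟨t, ht, rfl⟩ := List.mem_iff_getElem.mp he
    have hget : s.getD t 0 = s[t] := List.getD_eq_getElem s 0 ht
    have hkt : lowerBound s lo ≤ t := by
      by_contra hlt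
      have := hbelow t (by omega)
      omega
    refine ⟨by omega, ?_⟩
    calc s.getD (lowerBound s lo) 0 ≤ s.getD t 0 := by
          rcases Nat.eq_or_lt_of_le hkt with rfl | h
          · exact le_refl _
          · rw [List.getD_eq_getElem s 0 (by omega), hget]
            exact List.pairwise_iff_getElem.mp hs _ t (by omega) ht h
      _ ≤ hi := by rw [hget]; exact hehi

theorem insort_perm (s : List Int) (v : Int) (hs : s.Pairwise (· ≤ ·)) :
    (PySem.List.insert s ((lowerBound s v : Nat) : Int) v).Perm (v :: s) := by
  obtain ⟨hle, _, _⟩ := lowerBound_spec s v hs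
  rw [PySem.List.insert_natCast s _ v hle]
  calc (s.take (lowerBound s v) ++ v :: s.drop (lowerBound s v)).Perm
        (v :: (s.take (lowerBound s v) ++ s.drop (lowerBound s v))) := List.perm_middle
    _ = v :: s := by rw [List.take_append_drop]

theorem insort_sorted (s : List Int) (v : Int) (hs : s.Pairwise (· ≤ ·)) :
    (PySem.List.insert s ((lowerBound s v : Nat) : Int) v).Pairwise (· ≤ ·) := by
  obtain ⟨hle, hbelow, habove⟩ := lowerBound_spec s v hs
  rw [PySem.List.insert_natCast s _ v hle]
  rw [List.pairwise_append]
  refine ⟨hs.sublist (List.take_sublist _ _), ?_, ?_⟩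
  · rw [List.pairwise_cons]
    refine ⟨?_, hs.sublist (List.drop_sublist _ _)⟩
    intro b hb
    obtain ⟨i, hilen, rfl⟩ := List.mem_iff_getElem.mp hb
    rw [List.getElem_drop]
    have hlen : lowerBound s v + i < s.length := by simp at hilen; omega
    have := habove (lowerBound s v + i) (by omega) hlen
    rwa [List.getD_eq_getElem s 0 hlen] at this
  · intro a ha b hb
    obtain ⟨i, hilen, rfl⟩ := List.mem_iff_getElem.mp ha
    rw [List.getElem_take]
    have hlt : s.getD i 0 < v := by
      apply hbelow; simp [List.length_take] at hilen; omega
    rw [List.getD_eq_getElem s 0 (by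
      simp [List.length_take] at hilen; omega)] at hlt
    rcases List.mem_cons.mp hb with rfl | hbmem
    · exact le_of_lt hlt
    · obtain ⟨j, hjlen, rfl⟩ := List.mem_iff_getElem.mp hbmem
      rw [List.getElem_drop]
      have hlen : lowerBound s v + j < s.length := by simp at hjlen; omega
      have := habove (lowerBound s v + j) (by omega) hlen
      rw [List.getD_eq_getElem s 0 hlen] at this
      exact le_trans (le_of_lt hlt) this

theorem bLoop_eq_pairScan (x low : Int) (ts : List Int) (p : Int) (seen : List Int)
    (hs : seen.Pairwise (· ≤ ·)) :
    bLoop x low p seen ts = pairScan x low seen (presums p ts) := by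
  induction ts generalizing p seen with
  | nil => rfl
  | cons t ts ih =>
    show (if decide (lowerBound seen (p + t - x) < seen.length) &&
            decide (seen.getD (lowerBound seen (p + t - x)) 0 ≤ p + t - low) then true
          else bLoop x low (p + t)
            (PySem.List.insert seen ((lowerBound seen (p + t) : Nat) : Int) (p + t)) ts) =
        ((seen.any fun e => decide (p + t - x ≤ e) && decide (e ≤ p + t - low)) ||
          pairScan x low ((p + t) :: seen) (presums (p + t) ts))
    have hcond : (decide (lowerBound seen (p + t - x) < seen.length) &&
        decide (seen.getD (lowerBound seen (p + t - x)) 0 ≤ p + t - low)) =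
        (seen.any fun e => decide (p + t - x ≤ e) && decide (e ≤ p + t - low)) := by
      rw [Bool.eq_iff_iff]
      simp only [Bool.and_eq_true, decide_eq_true_eq, List.any_eq_true]
      exact search_iff seen (p + t - x) (p + t - low) hs
    rw [hcond]
    by_cases h : (seen.any fun e => decide (p + t - x ≤ e) && decide (e ≤ p + t - low)) = true
    · rw [h]; simp
    · rw [Bool.eq_false_iff.mpr h]
      simp only [if_neg (Bool.false_ne_true), Bool.false_or]
      rw [ih (p + t) _ (insort_sorted seen (p + t) hs)]
      exact pairScan_perm x low _ _ (presums (p + t) ts) (insort_perm seen (p + t) hs)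

-- ===== VERDICT (by name: the statement is the Claim_ definition above) =====
theorem canVote_spec : Claim_equal_canVote := by
  intro a n x _ hpre
  unfold Spec_canVote canVote canVote_alt
  rw [PySem.List.foldl_pyRange_zero_pyGetD a 0 (fun acc t => acc + t) 0]
  by_cases htot : a.foldl (fun acc t => acc + t) 0 ≤ x
  · simp only [if_pos htot]
  · simp only [if_neg htot]
    have hs : (PySem.List.sorted a (fun v => v) false).Pairwise (· ≤ ·) :=
      PySem.List.sorted_pairwise a (fun v => v)
    rcases hsl : PySem.List.sorted a (fun v => v) false with _ | ⟨h, t⟩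
    · -- sorted a = [] means a = []; then total = 0 and Pre_ forces 0 ≤ x, contradicting htot
      have ha : a = [] := by
        have := PySem.List.sorted_eq_nil_iff (xs := a) (key := fun v => v) (rev := false)
        exact this.mp hsl
      subst ha
      rcases hpre with hne | hx
      · exact absurd rfl hne
      · exact absurd (by simpa using hx) htot
    · rw [hsl] at hs
      rw [bLoop_eq_pairScan x _ (h :: t) 0 [] (List.Pairwise.nil)]
      have hmatch : (match h :: t with
          | [] => ([] : List Int)
          | h :: t => h :: presumTail h t) = h :: presumTail h t := rfl
      rw [hmatch]
      have hpres : h :: presumTail h t = presums 0 (h :: t) := by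
        simp [presums, presumTail_eq]
      rw [hpres]
      rw [Bool.eq_iff_iff]
      rw [anyPairs_iff (presums 0 (h :: t))
        (fun e q => decide (e + (a.foldl (fun acc t => acc + t) 0 - q) ≤ x) &&
          decide (a.foldl (fun acc t => acc + t) 0 - (e + (a.foldl (fun acc t => acc + t) 0 - q)) ≤ x))]
      rw [pair_sublist_iff (presums 0 (h :: t))
        (fun e q => (decide (e + (a.foldl (fun acc t => acc + t) 0 - q) ≤ x) &&
          decide (a.foldl (fun acc t => acc + t) 0 - (e + (a.foldl (fun acc t => acc + t) 0 - q)) ≤ x)) = true)]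
      rw [pairScan_iff]
      simp only [List.not_mem_nil, false_and, exists_false, false_or]
      constructor
      · rintro ⟨e, q, hsub, hw⟩
        simp only [Bool.and_eq_true, decide_eq_true_eq] at hw
        exact ⟨e, q, hsub, by omega, by omega⟩
      · rintro ⟨e, q, hsub, h1, h2⟩
        exact ⟨e, q, hsub, by simp only [Bool.and_eq_true, decide_eq_true_eq]; omega⟩
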